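-- pv_equiv track=rewrite | github.com/nadirlarhdir/Kate | Hololens_project/Autoencoder Classifier/GenerateImages.py | find_increasing
-- ===== SOURCE A (Python) =====
-- def find_increasing(seq):
--     found=[]
--     for i in range(0,len(seq)-1):
--         if abs(seq[i]-seq[i+1]) == 1:
--             found.append(seq[i])
--         else:
--             found.append(seq[i])
--             break
--     return (found)
-- ===== SOURCE B (Python) =====
-- def find_increasing(seq):
--     cut = next((i + 1 for i, (a, b) in enumerate(zip(seq, seq[1:])) if abs(a - b) != 1),
--                len(seq) - 1)
--     return list(seq[:cut])
-- ===== Notes on version B (the rewrite author's own statement) =====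
-- stated objective: simpler
-- what changed: B first locates the boundary (the first adjacent pair whose difference is not 1) with a single generator search over zipped pairs and then returns one slice of the input, instead of A's index loop that appends element by element into an accumulator with a break.
import Mathlib
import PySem

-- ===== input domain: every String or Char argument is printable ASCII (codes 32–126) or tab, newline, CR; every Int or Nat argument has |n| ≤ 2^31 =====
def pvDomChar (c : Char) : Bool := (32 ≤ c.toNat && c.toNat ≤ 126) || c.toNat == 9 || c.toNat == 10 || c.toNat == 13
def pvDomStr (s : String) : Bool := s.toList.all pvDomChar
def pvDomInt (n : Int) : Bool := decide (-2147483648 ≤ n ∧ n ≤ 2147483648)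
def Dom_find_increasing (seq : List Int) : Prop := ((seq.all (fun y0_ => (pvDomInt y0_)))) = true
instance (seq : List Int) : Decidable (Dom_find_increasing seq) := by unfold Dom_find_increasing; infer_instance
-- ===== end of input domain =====

-- B replaces A's element-by-element accumulator loop (with break) by a boundary search over
-- zipped adjacent pairs followed by a single slice; objective: simpler.

-- ===== PORT A =====
-- A's 'for i in range(0, len(seq)-1)' with break, ported as index recursion over the same state.
def find_increasing_loop (seq : List Int) (i : Nat) (found : List Int) : List Int :=
  if i < seq.length - 1 then
    if (PySem.List.pyGetD seq (i : Int) 0 - PySem.List.pyGetD seq ((i : Int) + 1) 0).natAbs = 1 then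
      find_increasing_loop seq (i + 1) (found ++ [PySem.List.pyGetD seq (i : Int) 0])
    else
      found ++ [PySem.List.pyGetD seq (i : Int) 0]
  else
    found
termination_by seq.length - i
decreasing_by omega

def find_increasing (seq : List Int) : List Int :=
  find_increasing_loop seq 0 []

-- ===== PORT B =====
-- B: enumerate the zipped adjacent pairs, find the first pair whose |difference| is not 1
-- (cut = its index + 1, default len - 1), and return the slice seq[:cut].
def find_increasing_alt (seq : List Int) : List Int :=
  let pairs := seq.zip (PySem.List.slice seq (some 1) none)
  let cut : Int :=
    match (PySem.List.enumerate pairs 0).find?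
        (fun p => decide ((p.2.1 - p.2.2).natAbs ≠ 1)) with
    | some p => p.1 + 1
    | none => (seq.length : Int) - 1
  PySem.List.slice seq none (some cut)

-- ===== PRECONDITION & SPEC =====
def Spec_find_increasing (seq : List Int) (out : List Int) : Prop := out = find_increasing_alt seq
instance (seq : List Int) (out : List Int) : Decidable (Spec_find_increasing seq out) := by unfold Spec_find_increasing; infer_instance

-- ===== CLAIM (what is proved, stated in full; the proofs are below) =====
def Claim_equal_find_increasing : Prop := ∀ (seq : List Int), Dom_find_increasing seq → Spec_find_increasing seq (find_increasing seq)

-- ===== LEMMAS AND PROOFS =====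

-- Common reference value: the prefix up to and including the first boundary element.
def fiSpec : List Int → List Int
  | a :: b :: r => if (a - b).natAbs = 1 then a :: fiSpec (b :: r) else [a]
  | _ => []

theorem fiSpec_short (l : List Int) (h : l.length ≤ 1) : fiSpec l = [] := by
  match l, h with
  | [], _ => rfl
  | [_], _ => rfl

theorem loopA_eq (seq : List Int) (i : Nat) (found : List Int) :
    find_increasing_loop seq i found = found ++ fiSpec (seq.drop i) := by
  induction i, found using find_increasing_loop.induct seq with
  | case1 i found hlt hcond ih =>
    rw [find_increasing_loop, if_pos hlt, if_pos hcond, ih]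
    have hi : i < seq.length := by omega
    have hi1 : i + 1 < seq.length := by omega
    have hdrop : seq.drop i = seq[i] :: seq.drop (i + 1) := List.drop_eq_getElem_cons hi
    have hdrop1 : seq.drop (i + 1) = seq[i + 1] :: seq.drop (i + 2) := List.drop_eq_getElem_cons hi1
    have hg0 : PySem.List.pyGetD seq (i : Int) 0 = seq[i] := by
      rw [PySem.List.pyGetD_natCast, List.getD_eq_getElem _ _ hi]
    have hg1 : PySem.List.pyGetD seq ((i : Int) + 1) 0 = seq[i + 1] := by
      have hc : ((i : Int) + 1) = ((i + 1 : Nat) : Int) := by push_cast; ring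
      rw [hc, PySem.List.pyGetD_natCast, List.getD_eq_getElem _ _ hi1]
    rw [hg0, hg1] at hcond
    rw [hdrop]
    conv_rhs => rw [hdrop1]
    rw [fiSpec, if_pos hcond, ← hdrop1, hg0]
    simp
  | case2 i found hlt hcond =>
    rw [find_increasing_loop, if_pos hlt, if_neg hcond]
    have hi : i < seq.length := by omega
    have hi1 : i + 1 < seq.length := by omega
    have hdrop : seq.drop i = seq[i] :: seq.drop (i + 1) := List.drop_eq_getElem_cons hi
    have hdrop1 : seq.drop (i + 1) = seq[i + 1] :: seq.drop (i + 2) := List.drop_eq_getElem_cons hi1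
    have hg0 : PySem.List.pyGetD seq (i : Int) 0 = seq[i] := by
      rw [PySem.List.pyGetD_natCast, List.getD_eq_getElem _ _ hi]
    have hg1 : PySem.List.pyGetD seq ((i : Int) + 1) 0 = seq[i + 1] := by
      have hc : ((i : Int) + 1) = ((i + 1 : Nat) : Int) := by push_cast; ring
      rw [hc, PySem.List.pyGetD_natCast, List.getD_eq_getElem _ _ hi1]
    rw [hg0, hg1] at hcond
    rw [hdrop]
    conv_rhs => rw [hdrop1]
    rw [fiSpec, if_neg hcond, hg0]
  | case3 i found hlt =>
    rw [find_increasing_loop, if_neg hlt]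
    rw [fiSpec_short _ (by simp; omega)]
    simp

theorem enumerate_shift {α : Type} (xs : List α) (s : Int) :
    PySem.List.enumerate xs (s + 1) = (PySem.List.enumerate xs s).map (fun p => (p.1 + 1, p.2)) := by
  induction xs generalizing s with
  | nil => simp [PySem.List.enumerate_nil]
  | cons x xs ih => rw [PySem.List.enumerate_cons, PySem.List.enumerate_cons, ih]; simp

theorem alt_eq (seq : List Int) : find_increasing_alt seq = fiSpec seq := by
  induction seq with
  | nil => rfl
  | cons a t ih =>
    match t with
    | [] => rfl
    | b :: r =>
      simp only [find_increasing_alt, PySem.List.slice_from_one, List.tail_cons,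
        List.zip_cons_cons, PySem.List.enumerate_cons, List.find?_cons]
      by_cases hbad : (a - b).natAbs ≠ 1
      · rw [decide_eq_true hbad]
        simp only []
        rw [fiSpec, if_neg hbad, PySem.List.slice_to]
        · rfl
        · norm_num
      · simp only [ne_eq, not_not] at hbad
        rw [decide_eq_false (by simpa using hbad)]
        simp only []
        rw [fiSpec, if_pos hbad, ← ih]
        rw [enumerate_shift, List.find?_map]
        have hcomp : ((fun (p : Int × Int × Int) => decide ((p.2.1 - p.2.2).natAbs ≠ 1)) ∘
            (fun (p : Int × Int × Int) => (p.1 + 1, p.2)))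
            = (fun (p : Int × Int × Int) => decide ((p.2.1 - p.2.2).natAbs ≠ 1)) := rfl
        rw [hcomp]
        simp only [find_increasing_alt, PySem.List.slice_from_one, List.tail_cons]
        cases hfind : List.find? (fun (p : Int × Int × Int) => decide ((p.2.1 - p.2.2).natAbs ≠ 1))
            (PySem.List.enumerate ((b :: r).zip r) 0) with
        | none =>
          simp only [Option.map_none]
          rw [PySem.List.slice_to, PySem.List.slice_to]
          · have h1 : (((a :: b :: r).length : Int) - 1).toNat
                = ((((b :: r).length : Int) - 1)).toNat + 1 := by simp
            rw [h1, List.take_succ_cons]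
          · simp only [List.length_cons]; push_cast; omega
          · simp only [List.length_cons]; push_cast; omega
        | some q =>
          simp only [Option.map_some]
          have hq0 : (0 : Int) ≤ q.1 := by
            have hmem := List.mem_of_find?_eq_some hfind
            have hfst : q.1 ∈ (PySem.List.enumerate ((b :: r).zip r) 0).map (·.1) :=
              List.mem_map_of_mem hmem
            rw [PySem.List.map_fst_enumerate, PySem.List.mem_pyRange_one] at hfst
            exact hfst.1
          rw [PySem.List.slice_to, PySem.List.slice_to]
          · have h1 : (q.1 + 1 + 1).toNat = (q.1 + 1).toNat + 1 := by omega
            rw [h1, List.take_succ_cons]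
          · omega
          · omega

-- ===== VERDICT (by name: the statement is the Claim_ definition above) =====
theorem find_increasing_spec : Claim_equal_find_increasing := by
  intro seq _
  unfold Spec_find_increasing find_increasing
  rw [loopA_eq, alt_eq]
  simp
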